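-- pv_equiv track=rewrite | github.com/Galaxy-Office-Automation/Protaigo-SQL_Agent | sql_optimizer_agent/optimizer/rewriter.py | _find_outer_where
-- ===== SOURCE A (Python) =====
-- def _find_outer_where(query: str) -> int:
--     """
--     BUG 4 FIX: Find the position of the OUTER WHERE clause only.
--
--     The old code used re.sub(r'WHERE', ..., count=1) which matched the
--     first WHERE encountered — usually one inside a subquery — and injected
--     the LEFT JOIN there instead of at the outer query level.
--
--     This method walks the query character by character, tracking parenthesis
--     depth. A WHERE keyword at depth 0 belongs to the outer query.
--     Returns the character position, or -1 if not found.
--     """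
--     depth = 0
--     i     = 0
--     qu    = query.upper()
--     while i < len(qu):
--         ch = qu[i]
--         if ch == '(':
--             depth += 1
--         elif ch == ')':
--             depth -= 1
--         elif ch == 'W' and depth == 0:
--             if qu[i:i+5] == 'WHERE':
--                 # Confirm it is a word boundary (not part of an identifier)
--                 before = qu[i-1] if i > 0 else ' '
--                 after  = qu[i+5] if i+5 < len(qu) else ' '
--                 if not before.isalnum() and before != '_' \
--                    and not after.isalnum() and after != '_':
--                     return i
--         i += 1
--     return -1
-- ===== SOURCE B (Python) =====
-- def _find_outer_where(query: str) -> int: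
--     # Collect all word-boundary WHERE candidate positions first, then return the
--     # first one whose prefix has balanced parentheses (outer level), else -1.
--     qu = query.upper()
--     n = len(qu)
--
--     def word(c):
--         return c.isalnum() or c == '_'
--
--     candidates = [i for i in range(n)
--                   if qu.startswith('WHERE', i)
--                   and (i == 0 or not word(qu[i - 1]))
--                   and (i + 5 >= n or not word(qu[i + 5]))]
--     for i in candidates:
--         if qu.count('(', 0, i) == qu.count(')', 0, i):
--             return i
--     return -1
-- ===== Notes on version B (the rewrite author's own statement) =====
-- stated objective: alternative
-- what changed: Replaces A's single character-by-character scan that interleaves depth tracking with the boundary/keyword test by a two-phase decomposition: first collect all word-boundary WHERE candidate positions, then return the first candidate whose prefix contains equally many opening and closing parentheses.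
import Mathlib
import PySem

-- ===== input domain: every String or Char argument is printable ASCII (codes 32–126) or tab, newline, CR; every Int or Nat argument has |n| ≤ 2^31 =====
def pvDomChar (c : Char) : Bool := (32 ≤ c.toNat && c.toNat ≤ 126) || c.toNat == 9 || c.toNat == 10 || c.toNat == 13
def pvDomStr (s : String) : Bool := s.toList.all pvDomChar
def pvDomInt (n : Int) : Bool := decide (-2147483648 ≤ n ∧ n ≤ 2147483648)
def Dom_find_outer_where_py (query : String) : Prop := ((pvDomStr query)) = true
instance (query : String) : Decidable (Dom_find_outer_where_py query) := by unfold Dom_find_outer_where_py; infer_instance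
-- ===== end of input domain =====

-- B replaces A's single interleaved depth-tracking character scan by a two-phase
-- decomposition: collect all word-boundary WHERE candidate positions first, then return
-- the first whose prefix has balanced parentheses (objective: alternative, same cost).

-- ===== PORT A =====
def pyBoundOk (c : Char) : Bool := !(PySem.Chars.isalnum c) && !(c == '_')


def find_outer_where_go (qu : List Char) (i : Nat) (depth : Int) : Int :=
  if h : i < qu.length then
    let ch := qu[i]
    if ch == '(' then find_outer_where_go qu (i+1) (depth+1)
    else if ch == ')' then find_outer_where_go qu (i+1) (depth-1)
    else if ch == 'W' && depth == 0 then
      if PySem.List.slice qu (some (i:Int)) (some ((i:Int)+5)) == "WHERE".toList then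
        let before := if 0 < i then qu.getD (i-1) ' ' else ' '
        let after  := if i+5 < qu.length then qu.getD (i+5) ' ' else ' '
        if pyBoundOk before && pyBoundOk after then (i : Int)
        else find_outer_where_go qu (i+1) depth
      else find_outer_where_go qu (i+1) depth
    else find_outer_where_go qu (i+1) depth
  else -1
termination_by qu.length - i


def find_outer_where_py (query : String) : Int :=
  find_outer_where_go (PySem.Chars.upper query.toList) 0 0


-- ===== PORT B =====
def isWordChar (c : Char) : Bool := PySem.Chars.isalnum c || c == '_'


def whereCand (qu : List Char) (i : Nat) : Bool :=
  "WHERE".toList.isPrefixOf (qu.drop i)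
  && (i == 0 || !isWordChar (qu.getD (i-1) ' '))
  && (decide (qu.length ≤ i + 5) || !isWordChar (qu.getD (i+5) ' '))


def find_outer_where_py_alt (query : String) : Int :=
  let qu := PySem.Chars.upper query.toList
  let candidates := (List.range qu.length).filter (whereCand qu)
  match candidates.find? (fun i => (qu.take i).count '(' == (qu.take i).count ')') with
  | some i => (i : Int)
  | none => -1


-- ===== PRECONDITION & SPEC =====
def Spec_find_outer_where_py (query : String) (out : Int) : Prop := out = find_outer_where_py_alt query
instance (query : String) (out : Int) : Decidable (Spec_find_outer_where_py query out) := by unfold Spec_find_outer_where_py; infer_instance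

-- ===== CLAIM (what is proved, stated in full; the proofs are below) =====
def Claim_equal_find_outer_where_py : Prop := ∀ (query : String), Dom_find_outer_where_py query → Spec_find_outer_where_py query (find_outer_where_py query)

-- ===== LEMMAS AND PROOFS =====

def pvP (qu : List Char) (i : Nat) : Bool :=
  whereCand qu i && ((qu.take i).count '(' == (qu.take i).count ')')


lemma pyBoundOk_eq_not_word (c : Char) : pyBoundOk c = !isWordChar c := by
  simp [pyBoundOk, isWordChar, Bool.not_or]


lemma intdiff_beq (a b : Nat) : (((a:Int) - (b:Int)) == 0) = (a == b) := by
  simp [sub_eq_zero]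


lemma slice_eq_prefix (qu : List Char) (i : Nat) :
    (PySem.List.slice qu (some (i:Int)) (some ((i:Int)+5)) == "WHERE".toList)
      = "WHERE".toList.isPrefixOf (qu.drop i) := by
  have h5 : ((i:Int)+5) = (((i+5 : Nat)):Int) := by push_cast; ring
  rw [h5, PySem.List.slice_natCast]
  have hlen : ("WHERE".toList).length = 5 := rfl
  have hsub : i + 5 - i = 5 := by omega
  rw [hsub]
  by_cases hb : "WHERE".toList.isPrefixOf (qu.drop i) = true
  · rw [hb, beq_iff_eq]
    have := List.prefix_iff_eq_take.mp (List.isPrefixOf_iff_prefix.mp hb)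
    rw [hlen] at this
    exact this.symm
  · rw [Bool.not_eq_true] at hb
    rw [hb, beq_eq_false_iff_ne]
    intro hEq
    rw [← Bool.not_eq_true] at hb
    exact hb (List.isPrefixOf_iff_prefix.mpr (List.prefix_iff_eq_take.mpr (by rw [hlen, hEq])))


lemma count_take_succ (qu : List Char) (i : Nat) (h : i < qu.length) (c : Char) :
    (qu.take (i+1)).count c = (qu.take i).count c + (if qu[i] = c then 1 else 0) := by
  rw [List.take_add_one, List.getElem?_eq_getElem h]
  rw [Option.toList_some, List.count_append, List.count_singleton]
  simp [beq_iff_eq]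


lemma pref_head_false (qu : List Char) (i : Nat) (h : i < qu.length) (hw : qu[i] ≠ 'W') :
    "WHERE".toList.isPrefixOf (qu.drop i) = false := by
  rw [List.drop_eq_getElem_cons h]
  show List.isPrefixOf ('W' :: "HERE".toList) _ = false
  simp [List.isPrefixOf, Ne.symm hw]


lemma bnd_before (qu : List Char) (i : Nat) :
    pyBoundOk (if 0 < i then qu.getD (i-1) ' ' else ' ')
      = (i == 0 || !isWordChar (qu.getD (i-1) ' ')) := by
  by_cases h0 : 0 < i
  · have : (i == 0) = false := by simp; omega
    rw [if_pos h0, this, Bool.false_or, pyBoundOk_eq_not_word]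
  · have hi : i = 0 := by omega
    subst hi
    rw [if_neg h0]
    simp only [BEq.rfl, Bool.true_or]
    decide


lemma bnd_after (qu : List Char) (i : Nat) :
    pyBoundOk (if i+5 < qu.length then qu.getD (i+5) ' ' else ' ')
      = (decide (qu.length ≤ i + 5) || !isWordChar (qu.getD (i+5) ' ')) := by
  by_cases h0 : i + 5 < qu.length
  · have : decide (qu.length ≤ i + 5) = false := by simp; omega
    rw [if_pos h0, this, Bool.false_or, pyBoundOk_eq_not_word]
  · have : decide (qu.length ≤ i + 5) = true := by simp; omega
    rw [if_neg h0, this, Bool.true_or]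
    decide


lemma go_eq (qu : List Char) (k : Nat) : ∀ i, qu.length - i = k →
    find_outer_where_go qu i ((((qu.take i).count '(' : Nat) : Int) - (((qu.take i).count ')' : Nat) : Int)) =
      (match (List.range' i (qu.length - i)).find? (pvP qu) with
       | some j => (j : Int)
       | none => -1) := by
  induction k with
  | zero =>
    intro i hk
    have h : ¬ i < qu.length := by omega
    rw [find_outer_where_go, hk, dif_neg h]
    simp
  | succ k ih =>
    intro i hk
    have h : i < qu.length := by omega
    have hk1 : qu.length - (i+1) = k := by omega
    have e1 := count_take_succ qu i h '('
    have e2 := count_take_succ qu i h ')'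
    have ih' := ih (i+1) hk1
    rw [hk1] at ih'
    rw [find_outer_where_go, dif_pos h, hk, List.range'_succ]
    by_cases h1 : qu[i] = '('
    · have hp : pvP qu i = false := by
        simp only [pvP, whereCand, pref_head_false qu i h (by rw [h1]; decide), Bool.false_and]
      rw [List.find?_cons_of_neg (ne_true_of_eq_false hp)]
      rw [if_pos (by simp [h1])]
      have hd : (((qu.take i).count '(' : Nat) : Int) - (((qu.take i).count ')' : Nat) : Int) + 1
          = (((qu.take (i+1)).count '(' : Nat) : Int) - (((qu.take (i+1)).count ')' : Nat) : Int) := by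
        rw [e1, e2]
        simp [h1]
        ring
      rw [hd, ih']
    · by_cases h2 : qu[i] = ')'
      · have hp : pvP qu i = false := by
          simp only [pvP, whereCand, pref_head_false qu i h (by rw [h2]; decide), Bool.false_and]
        rw [List.find?_cons_of_neg (ne_true_of_eq_false hp)]
        rw [if_neg (by simp [h1]), if_pos (by simp [h2])]
        have hd : (((qu.take i).count '(' : Nat) : Int) - (((qu.take i).count ')' : Nat) : Int) - 1
            = (((qu.take (i+1)).count '(' : Nat) : Int) - (((qu.take (i+1)).count ')' : Nat) : Int) := by
          rw [e1, e2]
          simp [h2]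
          ring
        rw [hd, ih']
      · -- qu[i] is not a parenthesis: the prefix paren counts do not change
        have hd : (((qu.take i).count '(' : Nat) : Int) - (((qu.take i).count ')' : Nat) : Int)
            = (((qu.take (i+1)).count '(' : Nat) : Int) - (((qu.take (i+1)).count ')' : Nat) : Int) := by
          rw [e1, e2]
          simp [h1, h2]
        rw [if_neg (by simp [h1]), if_neg (by simp [h2])]
        by_cases hw : qu[i] = 'W'
        · by_cases hdep : ((((qu.take i).count '(' : Nat) : Int) - (((qu.take i).count ')' : Nat) : Int)) = 0
          · rw [if_pos (by simp [hw, hdep])]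
            by_cases hpre : "WHERE".toList.isPrefixOf (qu.drop i) = true
            · rw [if_pos (by rw [slice_eq_prefix]; exact hpre)]
              by_cases hbnd : (pyBoundOk (if 0 < i then qu.getD (i-1) ' ' else ' ')
                  && pyBoundOk (if i+5 < qu.length then qu.getD (i+5) ' ' else ' ')) = true
              · have hbnd' := hbnd
                have hp : pvP qu i = true := by
                  have hcnt : ((qu.take i).count '(' == (qu.take i).count ')') = true := by
                    rw [← intdiff_beq]; simp [hdep]
                  rw [bnd_before, bnd_after] at hbnd
                  simp only [Bool.and_eq_true] at hbnd
                  simp only [pvP, whereCand, hpre, hbnd.1, hbnd.2, hcnt,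
                    Bool.and_true]
                rw [List.find?_cons_of_pos hp, if_pos hbnd']
              · have hbnd' := hbnd
                have hp : pvP qu i = false := by
                  rw [bnd_before, bnd_after] at hbnd
                  rw [Bool.not_eq_true, Bool.and_eq_false_iff] at hbnd
                  rcases hbnd with hb | hb <;>
                    simp only [pvP, whereCand, hb, Bool.and_false, Bool.false_and]
                rw [List.find?_cons_of_neg (ne_true_of_eq_false hp), if_neg hbnd', hd, ih']
            · rw [Bool.not_eq_true] at hpre
              have hp : pvP qu i = false := by
                simp only [pvP, whereCand, hpre, Bool.false_and]
              rw [List.find?_cons_of_neg (ne_true_of_eq_false hp),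
                if_neg (by rw [slice_eq_prefix, hpre]; exact Bool.false_ne_true), hd, ih']
          · have hp : pvP qu i = false := by
              have hcnt : ((qu.take i).count '(' == (qu.take i).count ')') = false := by
                rw [← intdiff_beq]; simp [hdep]
              simp only [pvP, hcnt, Bool.and_false]
            rw [List.find?_cons_of_neg (ne_true_of_eq_false hp), if_neg (by simp [hdep]), hd, ih']
        · have hp : pvP qu i = false := by
            simp only [pvP, whereCand, pref_head_false qu i h hw, Bool.false_and]
          rw [List.find?_cons_of_neg (ne_true_of_eq_false hp), if_neg (by simp [hw]), hd, ih']


theorem find_outer_where_equal (q : String) :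
    find_outer_where_py q = find_outer_where_py_alt q := by
  have hgo := go_eq (PySem.Chars.upper q.toList) ((PySem.Chars.upper q.toList).length) 0 (by omega)
  simp only [List.take_zero, List.count_nil, Nat.cast_zero, sub_zero, Nat.sub_zero] at hgo
  unfold find_outer_where_py find_outer_where_py_alt
  rw [hgo, ← List.range_eq_range']
  simp only [List.find?_filter]
  congr 2
  funext a
  simp [pvP, beq_eq_decide]


-- ===== VERDICT (by name: the statement is the Claim_ definition above) =====
theorem find_outer_where_py_spec : Claim_equal_find_outer_where_py := by
  intro q _
  unfold Spec_find_outer_where_py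
  exact find_outer_where_equal q
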